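-- pv_equiv track=rewrite | github.com/ShakunthalaNatarajan/Master_thesis_AburnsiiNCIM1409 | CDS_finder.py | get_cds_candidates_per_frame
-- ===== SOURCE A (Python) =====
-- def get_cds_candidates_per_frame( seq ):
--
-- 	candidates = []
-- 	codons = [ seq[i:i+3] for i in range( 0, len( seq ), 3 ) ]
-- 	current_seq = []
-- 	for codon in codons:
-- 		if codon in [ "TAA", "TGA", "TAG" ]:
-- 			current_seq.append( codon )
-- 			candidates.append( "".join( current_seq ) )
-- 			current_seq = []
-- 		else:
-- 			current_seq.append( codon )
-- 	return candidates
-- ===== SOURCE B (Python) =====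
-- def get_cds_candidates_per_frame(seq):
--     stops = [i for i in range(0, len(seq), 3) if seq[i:i+3] in ("TAA", "TGA", "TAG")]
--     candidates = []
--     prev = 0
--     for i in stops:
--         candidates.append(seq[prev:i + 3])
--         prev = i + 3
--     return candidates
-- ===== Notes on version B (the rewrite author's own statement) =====
-- stated objective: alternative
-- what changed: B first collects the indices of all stop codons in one pass and then slices the original string between consecutive split points, instead of streaming codons through an accumulator list that is flushed at each stop.
import Mathlib
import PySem

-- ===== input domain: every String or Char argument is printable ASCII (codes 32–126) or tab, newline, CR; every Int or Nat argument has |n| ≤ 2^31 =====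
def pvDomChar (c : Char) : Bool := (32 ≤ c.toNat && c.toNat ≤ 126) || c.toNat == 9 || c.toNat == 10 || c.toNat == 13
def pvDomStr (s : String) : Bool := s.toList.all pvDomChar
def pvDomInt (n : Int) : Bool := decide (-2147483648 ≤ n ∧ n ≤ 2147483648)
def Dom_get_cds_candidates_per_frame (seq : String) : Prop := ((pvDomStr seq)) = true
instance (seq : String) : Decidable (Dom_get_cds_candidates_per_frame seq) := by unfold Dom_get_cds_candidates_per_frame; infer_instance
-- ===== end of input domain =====

-- B locates all stop-codon indices in one pass and then slices the original string between
-- consecutive split points, instead of flushing a codon accumulator at each stop (objective: alternative).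

-- ===== PORT A =====
def get_cds_candidates_per_frame (seq : String) : List String :=
  let codons := (PySem.List.pyRange 0 (PySem.Str.len seq) 3).map
      (fun i => PySem.Str.slice seq (some i) (some (i + 3)))
  (codons.foldl
      (fun (st : List String × List String) codon =>
        if codon ∈ ["TAA", "TGA", "TAG"] then
          (st.1 ++ [PySem.Str.join "" (st.2 ++ [codon])], [])
        else
          (st.1, st.2 ++ [codon]))
      ([], [])).1

-- ===== PORT B =====
def get_cds_candidates_per_frame_alt (seq : String) : List String :=
  let stops := (PySem.List.pyRange 0 (PySem.Str.len seq) 3).filter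
      (fun i => decide (PySem.Str.slice seq (some i) (some (i + 3)) ∈ ["TAA", "TGA", "TAG"]))
  (stops.foldl
      (fun (st : List String × Int) i =>
        (st.1 ++ [PySem.Str.slice seq (some st.2) (some (i + 3))], i + 3))
      ([], 0)).1

-- ===== PRECONDITION & SPEC =====
def Spec_get_cds_candidates_per_frame (seq : String) (out : List String) : Prop := out = get_cds_candidates_per_frame_alt seq
instance (seq : String) (out : List String) : Decidable (Spec_get_cds_candidates_per_frame seq out) := by unfold Spec_get_cds_candidates_per_frame; infer_instance

-- ===== CLAIM (what is proved, stated in full; the proofs are below) =====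
def Claim_equal_get_cds_candidates_per_frame : Prop := ∀ (seq : String), Dom_get_cds_candidates_per_frame seq → Spec_get_cds_candidates_per_frame seq (get_cds_candidates_per_frame seq)

-- ===== LEMMAS AND PROOFS =====

-- "".join with empty separator is concatenation
lemma pv_join_nil_flatten (L : List (List Char)) : PySem.Chars.join [] L = L.flatten := by
  induction L with
  | nil => simp [PySem.Chars.join_nil]
  | cons a l ih =>
    cases l with
    | nil => simp [PySem.Chars.join_singleton]
    | cons b t => rw [PySem.Chars.join_cons_cons] at *; simp [ih]

-- two adjacent slices concatenate (list level)
lemma pv_slice_concat (cs : List Char) (p j : Nat) (hpj : p ≤ j) :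
    PySem.List.slice cs (some (p : Int)) (some (j : Int)) ++
      PySem.List.slice cs (some (j : Int)) (some ((j : Int) + 3)) =
    PySem.List.slice cs (some (p : Int)) (some ((j : Int) + 3)) := by
  have h3 : ((j : Int) + 3) = ((j + 3 : Nat) : Int) := by push_cast; ring
  rw [h3, PySem.List.slice_natCast, PySem.List.slice_natCast, PySem.List.slice_natCast]
  have h1 : j + 3 - p = (j - p) + 3 := by omega
  have h2 : j + 3 - j = 3 := by omega
  rw [h1, h2, List.take_add, List.drop_drop]
  rw [show p + (j - p) = j from by omega]

lemma pv_join_empty (seq : String) (a : Nat) :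
    PySem.Str.join "" ([] : List String) =
      PySem.Str.slice seq (some ((a : Nat) : Int)) (some ((a : Nat) : Int)) := by
  rw [← String.toList_inj]
  simp [PySem.Str.toList_join, PySem.Str.toList_slice, PySem.Chars.slice_eq_listSlice,
    PySem.List.slice_natCast, PySem.Chars.join, List.intercalate]

-- appending the next codon to the accumulator extends the covered slice
lemma pv_join_inv_step (seq : String) (p j : Nat) (hpj : p ≤ j) (cur : List String)
    (hcur : PySem.Str.join "" cur =
      PySem.Str.slice seq (some ((3 * p : Nat) : Int)) (some ((3 * j : Nat) : Int))) :
    PySem.Str.join "" (cur ++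
        [PySem.Str.slice seq (some ((3 * j : Nat) : Int)) (some (((3 * j : Nat) : Int) + 3))]) =
      PySem.Str.slice seq (some ((3 * p : Nat) : Int)) (some (((3 * j : Nat) : Int) + 3)) := by
  rw [← String.toList_inj] at hcur ⊢
  simp only [PySem.Str.toList_join, PySem.Str.toList_slice, PySem.Chars.slice_eq_listSlice,
    String.toList_empty, pv_join_nil_flatten, List.map_append, List.flatten_append,
    List.map_cons, List.map_nil, List.flatten_cons, List.flatten_nil, List.append_nil,
    PySem.Str.toList_slice] at hcur ⊢
  rw [hcur]
  exact pv_slice_concat seq.toList (3 * p) (3 * j) (by omega)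

-- the two loops agree from any aligned state
lemma pv_loop_eq (seq : String) (r : Nat) : ∀ (j p : Nat) (acc cur : List String),
    p ≤ j →
    PySem.Str.join "" cur =
      PySem.Str.slice seq (some ((3 * p : Nat) : Int)) (some ((3 * j : Nat) : Int)) →
    (((List.range' j r).map
          (fun k => PySem.Str.slice seq (some ((3 * k : Nat) : Int)) (some (((3 * k : Nat) : Int) + 3)))).foldl
        (fun (st : List String × List String) codon =>
          if codon ∈ ["TAA", "TGA", "TAG"] then
            (st.1 ++ [PySem.Str.join "" (st.2 ++ [codon])], [])
          else
            (st.1, st.2 ++ [codon]))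
        (acc, cur)).1
    = ((((List.range' j r).map (fun k => ((3 * k : Nat) : Int))).filter
          (fun i => decide (PySem.Str.slice seq (some i) (some (i + 3)) ∈ ["TAA", "TGA", "TAG"]))).foldl
        (fun (st : List String × Int) i =>
          (st.1 ++ [PySem.Str.slice seq (some st.2) (some (i + 3))], i + 3))
        (acc, ((3 * p : Nat) : Int))).1 := by
  induction r with
  | zero => intro j p acc cur _ _; simp
  | succ r ih =>
    intro j p acc cur hpj hcur
    rw [List.range'_succ]
    simp only [List.map_cons, List.foldl_cons, List.filter_cons]
    have hnext : ((3 * j : Nat) : Int) + 3 = ((3 * (j + 1) : Nat) : Int) := by push_cast; ring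
    by_cases h :
        PySem.Str.slice seq (some ((3 * j : Nat) : Int)) (some (((3 * j : Nat) : Int) + 3)) ∈
          (["TAA", "TGA", "TAG"] : List String)
    · simp only [h, if_true, decide_true, List.foldl_cons]
      rw [pv_join_inv_step seq p j hpj cur hcur, hnext]
      exact ih (j + 1) (j + 1) _ [] (le_refl _) (pv_join_empty seq (3 * (j + 1)))
    · simp only [h, if_false, decide_false]
      have hcur' := pv_join_inv_step seq p j hpj cur hcur
      rw [hnext] at hcur'
      exact ih (j + 1) p _ _ (by omega) hcur'

-- ===== VERDICT (by name: the statement is the Claim_ definition above) =====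
theorem get_cds_candidates_per_frame_spec : Claim_equal_get_cds_candidates_per_frame := by
  intro seq _
  unfold Spec_get_cds_candidates_per_frame get_cds_candidates_per_frame get_cds_candidates_per_frame_alt
  rw [PySem.Str.len_eq, PySem.List.pyRange_of_pos 0 _ (by norm_num), List.range_eq_range']
  simp only [List.map_map]
  have hfun : ∀ (f g : Nat → String), (∀ k, f k = g k) → ∀ l : List Nat, l.map f = l.map g := by
    intro f g hfg l; exact List.map_congr_left (fun k _ => hfg k)
  rw [hfun _ (fun k => PySem.Str.slice seq (some ((3 * k : Nat) : Int)) (some (((3 * k : Nat) : Int) + 3)))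
      (by intro k; simp only [Function.comp]; norm_num) _]
  rw [show (List.map (fun k : Nat => (0 : Int) + 3 * (k : Int)) (List.range' 0 _)) =
      (List.map (fun k : Nat => ((3 * k : Nat) : Int)) (List.range' 0 _)) from
    List.map_congr_left (fun k _ => by push_cast; ring)]
  have h := (pv_loop_eq seq
      (if (0 : Int) < (seq.toList.length : Int) then
        (((seq.toList.length : Int) - 0 + 3 - 1) / 3).toNat else 0)
      0 0 [] [] (le_refl 0) (pv_join_empty seq 0))
  simpa using h
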